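-- pv_equiv track=rewrite | github.com/Team-Alua/save-binary-scripts | save_editor.py | fnv1a_32
-- ===== SOURCE A (Python) =====
-- def fnv1a_32(char_bytes):
--     prime = 0x01000193
--     offset_basis = 0x811c9dc5
--     h = offset_basis
--
--     for char_byte in char_bytes:
--         h = h ^ char_byte
--         h = (h * prime) % 0x100000000
--     return h
-- ===== SOURCE B (Python) =====
-- def fnv1a_32(char_bytes):
--     # Lazy modular reduction: stage 1 normalizes every byte to its 32-bit
--     # residue; stage 2 folds XOR/multiply in unbounded integers and folds the
--     # mod 2**32 in only once per 64-byte block (and once more by entering the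
--     # next block), instead of reducing after every multiply.  Correct because
--     # ^ and * both commute with taking the low 32 bits.
--     words = [b & 0xFFFFFFFF for b in char_bytes]
--     h = 0x811c9dc5
--     i = 0
--     while i < len(words):
--         for w in words[i:i + 64]:
--             h = (h ^ w) * 0x01000193      # no reduction inside the block
--         h %= 0x100000000                  # one deferred reduction per block
--         i += 64
--     return h
-- ===== Notes on version B (the rewrite author's own statement) =====
-- stated objective: alternative
-- what changed: B is a two-stage lazy-modular-reduction variant: a first pass normalizes each byte to its 32-bit residue, then the XOR/multiply fold runs in unbounded integers and the mod 2^32 is applied only once per 64-byte block instead of after every multiply; correctness rests on ^ and * commuting with taking the low 32 bits.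
import Mathlib
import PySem

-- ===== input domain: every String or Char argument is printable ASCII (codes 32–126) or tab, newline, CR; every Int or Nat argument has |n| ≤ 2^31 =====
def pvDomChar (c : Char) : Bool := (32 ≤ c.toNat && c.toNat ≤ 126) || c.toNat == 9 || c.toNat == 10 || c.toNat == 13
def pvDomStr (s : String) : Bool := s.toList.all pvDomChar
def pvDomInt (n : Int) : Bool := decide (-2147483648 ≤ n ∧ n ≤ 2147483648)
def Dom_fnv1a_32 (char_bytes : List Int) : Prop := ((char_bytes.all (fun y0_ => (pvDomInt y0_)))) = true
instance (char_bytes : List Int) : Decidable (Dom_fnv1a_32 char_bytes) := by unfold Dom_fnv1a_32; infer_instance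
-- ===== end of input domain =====

-- B is a two-stage lazy-modular-reduction variant: it first normalizes each byte to its
-- 32-bit residue, then folds XOR/multiply in unbounded integers, reducing mod 2^32 only
-- once per 64-byte block (alternative decomposition; same asymptotic cost).


-- ===== PORT A =====
-- A's for-loop: explicit recursion threading the mutable local h,
-- 'h = h ^ char_byte; h = (h * prime) % 0x100000000'.
def fnvLoopA (h : Int) : List Int → Int
  | [] => h
  | b :: rest => fnvLoopA (PySem.Int.mod (PySem.Int.bxor h b * 16777619) 4294967296) rest

def fnv1a_32 (char_bytes : List Int) : Int := fnvLoopA 2166136261 char_bytes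

-- ===== PORT B =====
-- stage 2's block loop: 'for w in words[i:i+64]: h = (h ^ w) * PRIME', then 'h %= 2**32',
-- 'i += 64'.  The index i counts off 64 words per round, so the slice words[i:i+64] is
-- 'take 64' of the not-yet-processed suffix and 'i += 64' is 'drop 64' (exact).
def fnvAltBlocks (h : Int) (ws : List Int) : Int :=
  if ws = [] then h
  else
    fnvAltBlocks
      (PySem.Int.mod ((ws.take 64).foldl (fun a w => PySem.Int.bxor a w * 16777619) h) 4294967296)
      (ws.drop 64)
termination_by ws.length
decreasing_by
  rename_i h
  simp only [List.length_drop]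
  have := List.length_pos_of_ne_nil h
  omega

-- stage 1: 'words = [b & 0xFFFFFFFF for b in char_bytes]', then the block loop from the basis
def fnv1a_32_alt (char_bytes : List Int) : Int :=
  fnvAltBlocks 2166136261 (char_bytes.map (fun b => PySem.Int.band b 4294967295))

-- ===== PRECONDITION & SPEC =====
def Spec_fnv1a_32 (char_bytes : List Int) (out : Int) : Prop := out = fnv1a_32_alt char_bytes
instance (char_bytes : List Int) (out : Int) : Decidable (Spec_fnv1a_32 char_bytes out) := by unfold Spec_fnv1a_32; infer_instance

-- ===== CLAIM (what is proved, stated in full; the proofs are below) =====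
def Claim_equal_fnv1a_32 : Prop := ∀ (char_bytes : List Int), Dom_fnv1a_32 char_bytes → Spec_fnv1a_32 char_bytes (fnv1a_32 char_bytes)

-- ===== LEMMAS AND PROOFS =====

-- PySem.Int.mod by the positive literal 2^32 is Int.emod
theorem pmod_eq_emod (a : Int) : PySem.Int.mod a 4294967296 = a % 4294967296 :=
  PySem.Int.mod_eq_emod_of_pos (by norm_num)

-- masking with 0xFFFFFFFF equals taking Python % 0x100000000, for every integer
theorem band_mask_eq_mod (a : Int) : PySem.Int.band a 4294967295 = a % 4294967296 := by
  unfold PySem.Int.band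
  by_cases h : 0 ≤ a
  · simp only [if_pos h, if_pos (by norm_num : (0:ℤ) ≤ 4294967295)]
    have h1 : a.toNat &&& (4294967295:ℤ).toNat = a.toNat % 4294967296 := by
      have := Nat.and_two_pow_sub_one_eq_mod a.toNat 32
      norm_num at this ⊢
      exact this
    rw [h1]; omega
  · simp only [if_neg h, if_pos (by norm_num : (0:ℤ) ≤ 4294967295)]
    have h1 : (4294967295:ℤ).toNat &&& (-a-1).toNat = (-a-1).toNat % 4294967296 := by
      rw [Nat.land_comm]
      have := Nat.and_two_pow_sub_one_eq_mod (-a-1).toNat 32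
      norm_num at this ⊢
      exact this
    rw [h1]; omega

-- Nat: first-arg congruence of xor under mod 2^32
theorem nat_xor_mod_left (u v : ℕ) : (u ^^^ v) % 4294967296 = ((u % 4294967296) ^^^ v) % 4294967296 := by
  have h32 : (4294967296:ℕ) = 2^32 := by norm_num
  rw [h32]
  apply Nat.eq_of_testBit_eq
  intro i
  simp only [Nat.testBit_mod_two_pow, Nat.testBit_xor]
  by_cases h : i < 32 <;> simp [h]

-- Nat: xor with a reduced second argument, first argument already reduced
theorem nat_xor_mod_right (u v : ℕ) (hu : u < 4294967296) :
    (u ^^^ v) % 4294967296 = u ^^^ (v % 4294967296) := by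
  have h32 : (4294967296:ℕ) = 2^32 := by norm_num
  rw [h32] at hu ⊢
  apply Nat.eq_of_testBit_eq
  intro i
  simp only [Nat.testBit_mod_two_pow, Nat.testBit_xor]
  by_cases h : i < 32
  · simp [h]
  · have hui : u.testBit i = false :=
      Nat.testBit_lt_two_pow (lt_of_lt_of_le hu (Nat.pow_le_pow_right (by norm_num) (by omega)))
    simp [h, hui]

-- Nat: the negative-byte case, complement form
theorem nat_xor_mod_neg (u v : ℕ) (hu : u < 4294967296) :
    4294967295 - ((u ^^^ v) % 4294967296) = u ^^^ (4294967295 - v % 4294967296) := by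
  have h32 : (4294967296:ℕ) = 2^32 := by norm_num
  rw [h32] at hu ⊢
  have hz1 : (u ^^^ v) % 2^32 < 2^32 := Nat.mod_lt _ (by norm_num)
  have hz2 : v % 2^32 < 2^32 := Nat.mod_lt _ (by norm_num)
  have e1 : 4294967295 - (u ^^^ v) % 2^32 = 2^32 - ((u ^^^ v) % 2^32 + 1) := by omega
  have e2 : 4294967295 - v % 2^32 = 2^32 - (v % 2^32 + 1) := by omega
  rw [e1, e2]
  apply Nat.eq_of_testBit_eq
  intro i
  rw [Nat.testBit_two_pow_sub_succ hz1, Nat.testBit_xor, Nat.testBit_two_pow_sub_succ hz2,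
    Nat.testBit_mod_two_pow, Nat.testBit_xor, Nat.testBit_mod_two_pow]
  by_cases h : i < 32
  · cases hu' : u.testBit i <;> cases hv' : v.testBit i <;> simp [h]
  · have hui : u.testBit i = false :=
      Nat.testBit_lt_two_pow (lt_of_lt_of_le hu (Nat.pow_le_pow_right (by norm_num) (by omega)))
    simp [h, hui]

-- A's masked step
def stepA (h b : Int) : Int := PySem.Int.mod (PySem.Int.bxor h b * 16777619) 4294967296

theorem fnvLoopA_eq_foldl (cb : List Int) (h : Int) : fnvLoopA h cb = cb.foldl stepA h := by
  induction cb generalizing h with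
  | nil => rfl
  | cons b rest ih => simp only [fnvLoopA, List.foldl, ih, stepA]

-- congruence in the hash argument: deferring the mod does not change the masked step
theorem step_defer (x w : Int) (hx : 0 ≤ x) (hw : 0 ≤ w) :
    (PySem.Int.bxor x w * 16777619) % 4294967296
      = (PySem.Int.bxor (x % 4294967296) w * 16777619) % 4294967296 := by
  rw [PySem.Int.bxor_of_nonneg hx hw,
    PySem.Int.bxor_of_nonneg (Int.emod_nonneg x (by norm_num)) hw]
  have ht : (x % 4294967296).toNat = x.toNat % 4294967296 := by omega
  rw [ht]
  have hN := nat_xor_mod_left x.toNat w.toNat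
  omega

-- congruence in the byte argument: a masked hash xor a raw byte = xor its 32-bit residue
theorem step_byte (x b : Int) (hx : 0 ≤ x) (hx' : x < 4294967296) :
    (PySem.Int.bxor x b * 16777619) % 4294967296
      = (PySem.Int.bxor x (b % 4294967296) * 16777619) % 4294967296 := by
  lift x to ℕ using hx with u
  by_cases hb : 0 ≤ b
  · lift b to ℕ using hb with v
    have hbm : ((v:ℤ)) % 4294967296 = ((v % 4294967296 : ℕ) : ℤ) := by omega
    rw [hbm, PySem.Int.bxor_natCast, PySem.Int.bxor_natCast]
    have hN := nat_xor_mod_right u v (by omega)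
    omega
  · obtain ⟨v', rfl⟩ : ∃ v' : ℕ, b = -(v':ℤ) - 1 := ⟨(-b-1).toNat, by omega⟩
    have hbx : PySem.Int.bxor (u:ℤ) (-(v':ℤ) - 1) = -((u ^^^ v' : ℕ) : ℤ) - 1 := by
      unfold PySem.Int.bxor
      rw [if_pos (by positivity : (0:ℤ) ≤ (u:ℤ)), if_neg (by omega : ¬ (0:ℤ) ≤ -(v':ℤ) - 1)]
      norm_num
    have hbm : (-(v':ℤ) - 1) % 4294967296 = ((4294967295 - v' % 4294967296 : ℕ) : ℤ) := by omega
    rw [hbx, hbm, PySem.Int.bxor_natCast]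
    have hN := nat_xor_mod_neg u v' (by omega)
    omega

-- unreduced values stay nonnegative
theorem ustep_nonneg (x w : Int) (hx : 0 ≤ x) (hw : 0 ≤ w) :
    0 ≤ PySem.Int.bxor x w * 16777619 := by
  rw [PySem.Int.bxor_of_nonneg hx hw]
  positivity

-- the inner (unreduced) block fold, masked once at the end, equals the per-step masked fold
theorem inner_block (c : List Int) : (∀ w ∈ c, 0 ≤ w) → ∀ (x : Int), 0 ≤ x →
    (c.foldl (fun a w => PySem.Int.bxor a w * 16777619) x) % 4294967296
      = c.foldl stepA (x % 4294967296) := by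
  induction c with
  | nil => intro _ x _; rfl
  | cons w rest ih =>
    intro hc x hx
    have hw : 0 ≤ w := hc w (by simp)
    simp only [List.foldl_cons]
    rw [ih (fun y hy => hc y (by simp [hy])) _ (ustep_nonneg x w hx hw)]
    congr 1
    have hs : stepA (x % 4294967296) w
        = (PySem.Int.bxor (x % 4294967296) w * 16777619) % 4294967296 := by
      unfold stepA; rw [pmod_eq_emod]
    rw [hs]
    exact step_defer x w hx hw

-- the block recursion equals the per-step masked fold
theorem blocks_eq_aux : ∀ (n : ℕ) (ws : List Int), ws.length ≤ n → (∀ w ∈ ws, 0 ≤ w) →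
    ∀ (x : Int), fnvAltBlocks (x % 4294967296) ws = ws.foldl stepA (x % 4294967296) := by
  intro n
  induction n with
  | zero =>
    intro ws hlen _ x
    cases ws with
    | nil => rw [fnvAltBlocks]; simp
    | cons a t => simp at hlen
  | succ n ih =>
    intro ws hlen hws x
    by_cases hnil : ws = []
    · subst hnil; rw [fnvAltBlocks]; simp
    · rw [fnvAltBlocks, if_neg hnil, pmod_eq_emod]
      have htake := inner_block (ws.take 64) (fun w hw => hws w (List.mem_of_mem_take hw))
        (x % 4294967296) (Int.emod_nonneg x (by norm_num))
      rw [Int.emod_emod_of_dvd x (dvd_refl _)] at htake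
      rw [ih (ws.drop 64)
        (by simp only [List.length_drop]; have := List.length_pos_of_ne_nil hnil; omega)
        (fun w hw => hws w (List.mem_of_mem_drop hw))]
      rw [htake]
      have hsplit : ws.foldl stepA (x % 4294967296)
          = (ws.drop 64).foldl stepA ((ws.take 64).foldl stepA (x % 4294967296)) := by
        conv_lhs => rw [← List.take_append_drop 64 ws]
        rw [List.foldl_append]
      rw [hsplit]

-- replacing each byte by its 32-bit residue does not change the masked fold
theorem foldl_map_residue (cb : List Int) : ∀ (h : Int), 0 ≤ h → h < 4294967296 →
    cb.foldl stepA h = (cb.map fun b => PySem.Int.band b 4294967295).foldl stepA h := by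
  induction cb with
  | nil => intro h _ _; rfl
  | cons b rest ih =>
    intro h hh hh'
    simp only [List.map_cons, List.foldl_cons]
    have hb : stepA h (PySem.Int.band b 4294967295) = stepA h b := by
      unfold stepA
      rw [pmod_eq_emod, pmod_eq_emod, band_mask_eq_mod, ← step_byte h b hh hh']
    rw [hb]
    have h1 : stepA h b = (PySem.Int.bxor h b * 16777619) % 4294967296 := by
      unfold stepA; rw [pmod_eq_emod]
    exact ih (stepA h b) (by rw [h1]; exact Int.emod_nonneg _ (by norm_num))
      (by rw [h1]; exact Int.emod_lt_of_pos _ (by norm_num))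

-- ===== VERDICT (by name: the statement is the Claim_ definition above) =====
theorem fnv1a_32_spec : Claim_equal_fnv1a_32 := by
  intro cb _
  unfold Spec_fnv1a_32 fnv1a_32 fnv1a_32_alt
  rw [fnvLoopA_eq_foldl, foldl_map_residue cb 2166136261 (by norm_num) (by norm_num)]
  have hmem : ∀ w ∈ cb.map (fun b => PySem.Int.band b 4294967295), 0 ≤ w := by
    intro w hw
    simp only [List.mem_map] at hw
    obtain ⟨b, _, rfl⟩ := hw
    rw [band_mask_eq_mod]
    exact Int.emod_nonneg _ (by norm_num)
  have hblocks := blocks_eq_aux (cb.map (fun b => PySem.Int.band b 4294967295)).length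
    (cb.map (fun b => PySem.Int.band b 4294967295)) le_rfl hmem 2166136261
  have hini : (2166136261 : ℤ) % 4294967296 = 2166136261 := by norm_num
  rw [hini] at hblocks
  exact hblocks.symm
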